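-- pv_equiv track=rewrite | github.com/zeevox/advent-of-code | 2021/python/Day12.py | count_double_lowers
-- ===== SOURCE A (Python) =====
-- def count_double_lowers(path: list[str]):
--     count = 0
--     for n in path:
--         if not n.islower():
--             continue
--         if path.count(n) >= 2:
--             count += 1
--     return count
-- ===== SOURCE B (Python) =====
-- from itertools import groupby
--
--
-- def count_double_lowers(path: list[str]):
--     total = 0
--     for key, group in groupby(sorted(path)):
--         length = len(list(group))
--         if key.islower() and length >= 2:
--             total += length
--     return total
-- ===== Notes on version B (the rewrite author's own statement) =====
-- stated objective: faster
-- what changed: Instead of calling path.count(n) inside the loop (quadratic), B sorts a copy of the list once and does one groupby pass over the contiguous runs, adding each run's full length when the key is lowercase and the run has length >= 2.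
import Mathlib
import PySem

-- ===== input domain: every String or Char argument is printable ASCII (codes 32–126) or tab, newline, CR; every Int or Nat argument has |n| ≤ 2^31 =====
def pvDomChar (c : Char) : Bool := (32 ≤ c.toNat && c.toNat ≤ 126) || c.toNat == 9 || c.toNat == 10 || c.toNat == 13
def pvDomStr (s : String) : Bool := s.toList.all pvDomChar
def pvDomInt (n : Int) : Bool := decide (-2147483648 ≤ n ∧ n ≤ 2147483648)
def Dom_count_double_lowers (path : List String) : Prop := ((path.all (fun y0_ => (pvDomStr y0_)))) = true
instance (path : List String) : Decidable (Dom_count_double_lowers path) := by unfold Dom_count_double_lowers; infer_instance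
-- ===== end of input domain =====

-- B replaces A's quadratic per-element `path.count` scan by one sort plus a single
-- groupby-style pass over contiguous runs (objective: faster, O(n log n) vs O(n^2)).

-- shared helper: Python str.islower(), exact on the ASCII domain
-- (true iff some character is a lowercase letter and no character is an uppercase letter)
def pyStrIslower (s : String) : Bool :=
  s.toList.any PySem.Chars.islower && s.toList.all (fun c => !PySem.Chars.isupper c)

-- ===== PORT A =====
def count_double_lowers (path : List String) : Int :=
  path.foldl (fun count n =>
    if !(pyStrIslower n) then count
    else if 2 ≤ PySem.List.count path n then count + 1 else count) 0

-- ===== PORT B =====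
-- one pass over the sorted list: each step consumes one maximal run of equal strings
def pvRunSum : List String → Int
  | [] => 0
  | x :: xs =>
    let length := (xs.takeWhile (fun y => y == x)).length + 1
    (if pyStrIslower x && decide (2 ≤ length) then (length : Int) else 0)
      + pvRunSum (xs.dropWhile (fun y => y == x))
  termination_by s => s.length
  decreasing_by simpa [Nat.lt_succ_iff] using List.length_dropWhile_le _ _

def count_double_lowers_alt (path : List String) : Int :=
  pvRunSum (PySem.List.sorted path (fun x => x) false)

-- ===== PRECONDITION & SPEC =====
def Spec_count_double_lowers (path : List String) (out : Int) : Prop := out = count_double_lowers_alt path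
instance (path : List String) (out : Int) : Decidable (Spec_count_double_lowers path out) := by unfold Spec_count_double_lowers; infer_instance

-- ===== CLAIM (what is proved, stated in full; the proofs are below) =====
def Claim_equal_count_double_lowers : Prop := ∀ (path : List String), Dom_count_double_lowers path → Spec_count_double_lowers path (count_double_lowers path)

-- ===== LEMMAS AND PROOFS =====

-- indicator of one occurrence: 1 if the string is lowercase and occurs ≥ 2 times in ms
def pvInd (ms : List String) (n : String) : Int :=
  if pyStrIslower n && decide (2 ≤ List.count n ms) then 1 else 0

-- A's fold sums pvInd path over the traversed list
theorem foldlA_eq (path : List String) : ∀ (l : List String) (acc : Int),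
    l.foldl (fun count n =>
      if !(pyStrIslower n) then count
      else if 2 ≤ PySem.List.count path n then count + 1 else count) acc
      = acc + (l.map (pvInd path)).sum
  | [], acc => by simp
  | n :: l, acc => by
    rw [List.foldl_cons, foldlA_eq path l, List.map_cons, List.sum_cons]
    simp only [pvInd, PySem.List.count_eq]
    by_cases hl : pyStrIslower n
    all_goals by_cases hc : 2 ≤ List.count n path
    all_goals simp [hl, hc]
    all_goals ring

-- x does not survive its own run: dropWhile (== x) of a sorted tail contains no x
theorem not_mem_dropWhile_le (x : String) (xs : List String)
    (hx : ∀ y ∈ xs, x ≤ y) (hxs : xs.Pairwise (· ≤ ·)) :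
    x ∉ xs.dropWhile (fun y => y == x) := by
  intro hmem
  cases hdd : xs.dropWhile (fun y => y == x) with
  | nil => rw [hdd] at hmem; simp at hmem
  | cons h t =>
    rw [hdd] at hmem
    have hne : xs.dropWhile (fun y => y == x) ≠ [] := by simp [hdd]
    have h0 := List.head_dropWhile_not (fun y => y == x) hne
    simp only [hdd, List.head_cons, beq_eq_false_iff_ne, ne_eq] at h0
    have hhmem : h ∈ xs := (List.dropWhile_sublist _).mem (by rw [hdd]; simp)
    have hxh : x ≤ h := hx h hhmem
    rcases List.mem_cons.mp hmem with rfl | hxt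
    · exact h0 rfl
    · have hdp : (h :: t).Pairwise (· ≤ ·) := hdd ▸ hxs.sublist (List.dropWhile_sublist _)
      exact h0 (le_antisymm ((List.pairwise_cons.mp hdp).1 x hxt) hxh)

-- on a ≤-sorted list, pvRunSum equals the sum of the occurrence indicators
theorem runSum_eq : ∀ (s : List String), s.Pairwise (· ≤ ·) →
    pvRunSum s = (s.map (pvInd s)).sum
  | [], _ => by simp [pvRunSum]
  | x :: xs, hp => by
    have hx : ∀ y ∈ xs, x ≤ y := (List.pairwise_cons.mp hp).1
    have hxs : xs.Pairwise (· ≤ ·) := (List.pairwise_cons.mp hp).2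
    set r := xs.takeWhile (fun y => y == x) with hr
    set d := xs.dropWhile (fun y => y == x) with hd
    have hsplit : r ++ d = xs := List.takeWhile_append_dropWhile
    have hrx : ∀ y ∈ r, y = x := fun y hy => by
      have := List.mem_takeWhile_imp hy; simpa using this
    have hxd : x ∉ d := not_mem_dropWhile_le x xs hx hxs
    have hcountx : List.count x (x :: xs) = r.length + 1 := by
      rw [← hsplit, List.count_cons_self, List.count_append,
        List.count_eq_length.mpr (fun b hb => (hrx b hb).symm),
        List.count_eq_zero.mpr hxd]
    have hcountd : ∀ n ∈ d, List.count n (x :: xs) = List.count n d := by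
      intro n hn
      have hnx : n ≠ x := fun h => hxd (h ▸ hn)
      rw [← hsplit, List.count_cons_of_ne (Ne.symm hnx), List.count_append,
        List.count_eq_zero.mpr (fun hmem => hnx (hrx n hmem))]
      omega
    have hdp : d.Pairwise (· ≤ ·) := hxs.sublist (List.dropWhile_sublist _)
    have ih : pvRunSum d = (d.map (pvInd d)).sum := runSum_eq d hdp
    -- unfold one step of pvRunSum
    have hstep : pvRunSum (x :: xs)
        = (if pyStrIslower x && decide (2 ≤ r.length + 1) then ((r.length : Int) + 1) else 0)
          + pvRunSum d := by
      rw [pvRunSum]; push_cast; rfl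
    -- rewrite the right-hand sum run by run
    have hmapr : (r.map (pvInd (x :: xs))).sum = (r.length : Int) * pvInd (x :: xs) x := by
      have hrep : List.map (pvInd (x :: xs)) r
          = List.replicate r.length (pvInd (x :: xs) x) := by
        rw [List.eq_replicate_iff]
        refine ⟨by simp, fun b hb => ?_⟩
        obtain ⟨y, hy, rfl⟩ := List.mem_map.mp hb
        rw [hrx y hy]
      rw [hrep, List.sum_replicate, nsmul_eq_mul]
    have hmapd : d.map (pvInd (x :: xs)) = d.map (pvInd d) := by
      refine List.map_congr_left (fun n hn => ?_)
      simp only [pvInd, hcountd n hn]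
    calc pvRunSum (x :: xs)
        = (if pyStrIslower x && decide (2 ≤ r.length + 1) then ((r.length : Int) + 1) else 0)
          + pvRunSum d := hstep
      _ = ((r.length : Int) + 1) * pvInd (x :: xs) x + (d.map (pvInd d)).sum := by
          rw [ih]; congr 1
          simp only [pvInd, hcountx]
          split_ifs <;> ring
      _ = (((x :: xs).map (pvInd (x :: xs)))).sum := by
          conv_rhs => rw [show (x :: xs).map (pvInd (x :: xs))
            = (x :: r ++ d).map (pvInd (x :: xs)) from by rw [List.cons_append, hsplit]]
          simp only [List.map_cons, List.map_append, List.sum_cons, List.sum_append,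
            hmapd]
          rw [hmapr]
          ring
  termination_by s => s.length
  decreasing_by simpa [Nat.lt_succ_iff] using List.length_dropWhile_le _ _

-- ===== VERDICT (by name: the statement is the Claim_ definition above) =====
theorem count_double_lowers_spec : Claim_equal_count_double_lowers := by
  intro path _
  show count_double_lowers path = count_double_lowers_alt path
  have hperm : (PySem.List.sorted path (fun x => x) false).Perm path :=
    PySem.List.sorted_perm path _ _
  have hpw : (PySem.List.sorted path (fun x => x) false).Pairwise (· ≤ ·) :=
    PySem.List.sorted_pairwise path (fun x => x)
  rw [count_double_lowers, foldlA_eq path path 0, zero_add,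
    count_double_lowers_alt, runSum_eq _ hpw]
  have hind : ∀ n, pvInd (PySem.List.sorted path (fun x => x) false) n = pvInd path n := by
    intro n; simp only [pvInd, hperm.count_eq n]
  rw [List.map_congr_left (fun n _ => hind n)]
  exact ((hperm.map (pvInd path)).sum_eq).symm
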